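-- pv_equiv track=rewrite | github.com/inosven/OpenTypeFewer | src/voicepad/modules/settings_window/settings_gui.py | _sort_hotkey_keys
-- ===== SOURCE A (Python) =====
-- MODIFIER_SORT_ORDER = {"ctrl": 0, "alt": 1, "shift": 2, "windows": 3}
--
-- def _sort_hotkey_keys(key_set: set) -> list:
--     modifier_keys = []
--     regular_keys = []
--     for key_name in key_set:
--         if key_name in MODIFIER_SORT_ORDER:
--             modifier_keys.append(key_name)
--         else:
--             regular_keys.append(key_name)
--     modifier_keys.sort(key=lambda m: MODIFIER_SORT_ORDER.get(m, 99))
--     return modifier_keys + sorted(regular_keys)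
-- ===== SOURCE B (Python) =====
-- MODIFIER_SORT_ORDER = {"ctrl": 0, "alt": 1, "shift": 2, "windows": 3}
--
-- def _sort_hotkey_keys(key_set: set) -> list:
--     return sorted(key_set, key=lambda k: (MODIFIER_SORT_ORDER.get(k, 99), k))
-- ===== Notes on version B (the rewrite author's own statement) =====
-- stated objective: simpler
-- what changed: Replaces the partition loop plus two separate sorts and a concatenation with one sorted() over the whole set using the composite key (modifier rank or 99, key string).
import Mathlib
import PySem

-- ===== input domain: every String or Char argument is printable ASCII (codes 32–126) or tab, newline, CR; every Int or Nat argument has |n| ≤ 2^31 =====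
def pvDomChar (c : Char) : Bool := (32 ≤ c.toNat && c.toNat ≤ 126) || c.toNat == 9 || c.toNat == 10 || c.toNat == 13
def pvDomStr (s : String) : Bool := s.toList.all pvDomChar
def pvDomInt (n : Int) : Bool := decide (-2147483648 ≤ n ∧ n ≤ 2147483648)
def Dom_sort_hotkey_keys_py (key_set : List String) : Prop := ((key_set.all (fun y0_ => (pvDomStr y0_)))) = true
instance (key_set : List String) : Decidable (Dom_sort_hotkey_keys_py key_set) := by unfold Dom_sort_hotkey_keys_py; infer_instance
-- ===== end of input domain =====

-- B replaces A's partition loop + two sorts + concatenation with one sort under the composite key (modifier rank or 99, key string): simpler.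


-- ===== PORT A =====
def MODIFIER_SORT_ORDER : PySem.Dict String Int :=
  { items := [("ctrl", 0), ("alt", 1), ("shift", 2), ("windows", 3)] }

def sort_hotkey_keys_py (key_set : List String) : List String :=
  -- for key_name in key_set: append to modifier_keys / regular_keys
  let p := key_set.foldl
    (fun acc key_name =>
      if MODIFIER_SORT_ORDER.contains key_name then (acc.1 ++ [key_name], acc.2)
      else (acc.1, acc.2 ++ [key_name]))
    ([], [])
  -- modifier_keys.sort(key=lambda m: MODIFIER_SORT_ORDER.get(m, 99)); return modifier_keys + sorted(regular_keys)
  PySem.List.sorted p.1 (fun m => MODIFIER_SORT_ORDER.getD m 99) false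
    ++ PySem.List.sorted p.2 (fun x => x) false

-- ===== PORT B =====
def sort_hotkey_keys_py_alt (key_set : List String) : List String :=
  PySem.List.sorted2 key_set (fun k => MODIFIER_SORT_ORDER.getD k 99) (fun k => k) false

-- ===== PRECONDITION & SPEC =====
-- A's parameter is a Python set: under the type convention the list holds its DISTINCT elements, so Pre_ states exactly that.
def Pre_sort_hotkey_keys_py (key_set : List String) : Prop := key_set.Nodup
instance (key_set : List String) : Decidable (Pre_sort_hotkey_keys_py key_set) := by unfold Pre_sort_hotkey_keys_py; infer_instance
def pvWitness_sort_hotkey_keys_py : List String := ["shift", "a", "ctrl", "F1"]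

def Spec_sort_hotkey_keys_py (key_set : List String) (out : List String) : Prop := out = sort_hotkey_keys_py_alt key_set
instance (key_set : List String) (out : List String) : Decidable (Spec_sort_hotkey_keys_py key_set out) := by unfold Spec_sort_hotkey_keys_py; infer_instance

-- ===== CLAIM (what is proved, stated in full; the proofs are below) =====
def Claim_equal_sort_hotkey_keys_py : Prop := ∀ (key_set : List String), Dom_sort_hotkey_keys_py key_set → Pre_sort_hotkey_keys_py key_set → Spec_sort_hotkey_keys_py key_set (sort_hotkey_keys_py key_set)

-- ===== LEMMAS AND PROOFS =====

-- the composite boolean comparison inside sorted2 is the strict lexicographic order on (k1 x, x)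
lemma sorted2_eq_sorted_lex (xs : List String) (k1 : String → Int) :
    PySem.List.sorted2 xs k1 (fun k => k) false
      = PySem.List.sorted xs (fun x => toLex (k1 x, x)) false := by
  rw [PySem.List.sorted_eq_foldl_insertBy]
  unfold PySem.List.sorted2
  simp only [Bool.false_eq_true, if_false]
  congr 1
  funext acc x
  congr 1
  funext a b
  by_cases h1 : k1 a < k1 b <;> by_cases h2 : k1 b < k1 a <;> by_cases h3 : a < b <;>
    simp [h1, h2, h3, Prod.Lex.lt_iff] <;> omega

-- A's key function is injective on the modifier keys
lemma mod_key_inj (a b : String)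
    (ha : MODIFIER_SORT_ORDER.contains a = true) (hb : MODIFIER_SORT_ORDER.contains b = true)
    (h : MODIFIER_SORT_ORDER.getD a 99 = MODIFIER_SORT_ORDER.getD b 99) : a = b := by
  simp [ MODIFIER_SORT_ORDER, PySem.Dict.contains_mk] at ha hb
  rcases ha with h1|h1|h1|h1 <;> rcases hb with h2|h2|h2|h2 <;> subst h1 <;> subst h2 <;>
    first | rfl | (exfalso; revert h; decide)

lemma mod_key_lt (a : String) (ha : MODIFIER_SORT_ORDER.contains a = true) :
    MODIFIER_SORT_ORDER.getD a 99 < 99 := by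
  simp [ MODIFIER_SORT_ORDER, PySem.Dict.contains_mk] at ha
  rcases ha with h1|h1|h1|h1 <;> subst h1 <;> decide

lemma reg_key_eq (b : String) (hb : MODIFIER_SORT_ORDER.contains b = false) :
    MODIFIER_SORT_ORDER.getD b 99 = 99 :=
  PySem.Dict.getD_of_not_contains _ _ hb

-- A's appending loop is the pair of filters
lemma partition_eq (xs : List String) :
    xs.foldl
      (fun acc key_name =>
        if MODIFIER_SORT_ORDER.contains key_name then (acc.1 ++ [key_name], acc.2)
        else (acc.1, acc.2 ++ [key_name]))
      (([] : List String), ([] : List String))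
    = (xs.filter (fun k => MODIFIER_SORT_ORDER.contains k),
       xs.filter (fun k => !MODIFIER_SORT_ORDER.contains k)) := by
  have h1 : (fun (acc : List String × List String) key_name =>
        if MODIFIER_SORT_ORDER.contains key_name then (acc.1 ++ [key_name], acc.2)
        else (acc.1, acc.2 ++ [key_name]))
      = fun acc key_name =>
        ((if MODIFIER_SORT_ORDER.contains key_name then acc.1 ++ [key_name] else acc.1),
         (if !MODIFIER_SORT_ORDER.contains key_name then acc.2 ++ [key_name] else acc.2)) := by
    funext acc k
    cases h : MODIFIER_SORT_ORDER.contains k <;> simp [h]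
  rw [h1, PySem.List.foldl_prod_mk
      (f := fun acc k => if MODIFIER_SORT_ORDER.contains k then acc ++ [k] else acc)
      (g := fun acc k => if !MODIFIER_SORT_ORDER.contains k then acc ++ [k] else acc),
    PySem.List.foldl_append_if_eq_filter, PySem.List.foldl_append_if_eq_filter]
  rfl

-- the heart: one lexicographic sort equals modifiers-sorted ++ regulars-sorted, on a duplicate-free list
lemma sorted_lex_eq_append (xs : List String) (hnd : xs.Nodup) :
    PySem.List.sorted xs (fun x => toLex (MODIFIER_SORT_ORDER.getD x 99, x)) false
      = PySem.List.sorted (xs.filter (fun k => MODIFIER_SORT_ORDER.contains k))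
          (fun m => MODIFIER_SORT_ORDER.getD m 99) false
        ++ PySem.List.sorted (xs.filter (fun k => !MODIFIER_SORT_ORDER.contains k))
          (fun x => x) false := by
  set mods := xs.filter (fun k => MODIFIER_SORT_ORDER.contains k) with hm
  set regs := xs.filter (fun k => !MODIFIER_SORT_ORDER.contains k) with hr
  apply PySem.List.sorted_eq_of_perm_of_pairwise_lt
  · exact ((PySem.List.sorted_perm mods _ false).append
      (PySem.List.sorted_perm regs _ false)).trans (List.filter_append_perm _ xs)
  · rw [List.pairwise_append]
    refine ⟨?_, ?_, ?_⟩
    · -- sorted modifier block: strictly increasing ranks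
      have hp := PySem.List.sorted_pairwise mods (fun m => MODIFIER_SORT_ORDER.getD m 99)
      have hn : (PySem.List.sorted mods (fun m => MODIFIER_SORT_ORDER.getD m 99) false).Nodup :=
        (PySem.List.sorted_perm mods _ false).symm.nodup (hnd.filter _)
      refine (hp.and hn).imp_of_mem ?_
      intro a b hma hmb ⟨hle, hne⟩
      have hca : MODIFIER_SORT_ORDER.contains a = true := by
        have := (PySem.List.mem_sorted mods _ false a).mp hma
        exact (List.mem_filter.mp (hm ▸ this)).2
      have hcb : MODIFIER_SORT_ORDER.contains b = true := by
        have := (PySem.List.mem_sorted mods _ false b).mp hmb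
        exact (List.mem_filter.mp (hm ▸ this)).2
      rw [Prod.Lex.lt_iff]
      left
      rcases lt_or_eq_of_le hle with h | h
      · exact h
      · exact absurd (mod_key_inj a b hca hcb h) hne
    · -- sorted regular block: equal ranks, strictly increasing strings
      have hp := PySem.List.sorted_pairwise regs (fun x : String => x)
      have hn : (PySem.List.sorted regs (fun x : String => x) false).Nodup :=
        (PySem.List.sorted_perm regs _ false).symm.nodup (hnd.filter _)
      refine (hp.and hn).imp_of_mem ?_
      intro a b hma hmb ⟨hle, hne⟩
      have hca : MODIFIER_SORT_ORDER.contains a = false := by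
        have := (PySem.List.mem_sorted regs _ false a).mp hma
        have hx := (List.mem_filter.mp (hr ▸ this)).2
        revert hx; cases MODIFIER_SORT_ORDER.contains _ <;> simp
      have hcb : MODIFIER_SORT_ORDER.contains b = false := by
        have := (PySem.List.mem_sorted regs _ false b).mp hmb
        have hx := (List.mem_filter.mp (hr ▸ this)).2
        revert hx; cases MODIFIER_SORT_ORDER.contains _ <;> simp
      rw [Prod.Lex.lt_iff]
      right
      exact ⟨by simp [reg_key_eq a hca, reg_key_eq b hcb], lt_of_le_of_ne hle hne⟩
    · -- every modifier precedes every regular key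
      intro a hma b hmb
      have hca : MODIFIER_SORT_ORDER.contains a = true := by
        have := (PySem.List.mem_sorted mods _ false a).mp hma
        exact (List.mem_filter.mp (hm ▸ this)).2
      have hcb : MODIFIER_SORT_ORDER.contains b = false := by
        have := (PySem.List.mem_sorted regs _ false b).mp hmb
        have hx := (List.mem_filter.mp (hr ▸ this)).2
        revert hx; cases MODIFIER_SORT_ORDER.contains _ <;> simp
      rw [Prod.Lex.lt_iff]
      left
      rw [reg_key_eq b hcb]
      exact mod_key_lt a hca

-- ===== VERDICT (by name: the statement is the Claim_ definition above) =====
theorem sort_hotkey_keys_py_spec : Claim_equal_sort_hotkey_keys_py := by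
  intro key_set _ hpre
  unfold Spec_sort_hotkey_keys_py sort_hotkey_keys_py sort_hotkey_keys_py_alt
  rw [sorted2_eq_sorted_lex, sorted_lex_eq_append key_set hpre, partition_eq]
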